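-- pv_equiv track=rewrite | github.com/dmitryostanin/python_basics_22102020 | homeworks/lesson_4/task_7.py | fact_gen
-- ===== SOURCE A (Python) =====
-- def fact_gen(n):
--     if n == 0:
--         yield 1
--     else:
--         result = 1
--         for num in range(1, n + 1):
--             result *= num
--             yield result
-- ===== SOURCE B (Python) =====
-- def _factorial(k):
--     return 1 if k <= 1 else k * _factorial(k - 1)
--
--
-- def fact_gen(n):
--     if n == 0:
--         yield 1
--     else:
--         for num in range(1, n + 1):
--             yield _factorial(num)
-- ===== Notes on version B (the rewrite author's own statement) =====
-- stated objective: alternative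
-- what changed: B drops A's running-product accumulator and yields each factorial computed independently by a recursive helper, so the loop keeps no state between iterations.
import Mathlib
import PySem

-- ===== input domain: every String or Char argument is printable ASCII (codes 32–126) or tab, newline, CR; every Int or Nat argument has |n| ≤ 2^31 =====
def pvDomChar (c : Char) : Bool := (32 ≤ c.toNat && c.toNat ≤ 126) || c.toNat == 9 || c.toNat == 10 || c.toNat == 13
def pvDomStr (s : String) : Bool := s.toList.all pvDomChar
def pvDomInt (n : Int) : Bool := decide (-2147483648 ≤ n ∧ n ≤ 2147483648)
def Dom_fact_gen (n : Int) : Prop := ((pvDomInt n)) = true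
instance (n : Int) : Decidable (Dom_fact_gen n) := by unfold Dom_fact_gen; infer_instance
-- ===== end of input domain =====

-- B replaces A's stateful running-product loop by independently recomputing each
-- factorial with a recursive helper ('alternative': stateless loop, not faster).

-- ===== PORT A =====
-- A keeps a running accumulator `result` and yields it after each multiplication.
-- the loop body: result *= num; yield result
def fact_gen_step (st : Int × List Int) (num : Int) : Int × List Int :=
  let result := st.1 * num
  (result, st.2 ++ [result])

def fact_gen (n : Int) : List Int :=
  if n == 0 then [1]
  else ((PySem.List.pyRange 1 (n + 1) 1).foldl fact_gen_step (1, [])).2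

-- ===== PORT B =====
-- recursive helper _factorial(k) = 1 if k <= 1 else k * _factorial(k-1)
def factB (k : Int) : Int :=
  if k ≤ 1 then 1 else k * factB (k - 1)
termination_by k.toNat
decreasing_by omega

def fact_gen_alt (n : Int) : List Int :=
  if n == 0 then [1]
  else (PySem.List.pyRange 1 (n + 1) 1).map factB

-- ===== PRECONDITION & SPEC =====
def Spec_fact_gen (n : Int) (out : List Int) : Prop := out = fact_gen_alt n
instance (n : Int) (out : List Int) : Decidable (Spec_fact_gen n out) := by unfold Spec_fact_gen; infer_instance

-- ===== CLAIM (what is proved, stated in full; the proofs are below) =====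
def Claim_equal_fact_gen : Prop := ∀ (n : Int), Dom_fact_gen n → Spec_fact_gen n (fact_gen n)

-- ===== LEMMAS AND PROOFS =====

theorem factB_step (k : Int) (hk : 1 ≤ k) : factB (k - 1) * k = factB k := by
  rcases lt_or_ge 1 k with h | h
  · conv_rhs => rw [factB, if_neg (by omega : ¬ k ≤ 1)]
    exact mul_comm _ _
  · have hk1 : k = 1 := le_antisymm h hk
    subst hk1
    have h0 : factB 0 = 1 := by rw [factB]; norm_num
    have h1 : factB 1 = 1 := by rw [factB]; norm_num
    norm_num [h0, h1]

theorem loop_eq (l : List Int) : ∀ (k : Int), 1 ≤ k →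
    l = PySem.List.pyRange k (k + l.length) 1 →
    ∀ (acc : List Int),
    (l.foldl fact_gen_step (factB (k - 1), acc)).2 = acc ++ l.map factB := by
  induction l with
  | nil => intro k _ _ acc; simp
  | cons x xs ih =>
    intro k hk hl acc
    have hkb : k < k + ((x :: xs).length : Int) := by
      simp only [List.length_cons]; push_cast; omega
    rw [PySem.List.pyRange_one_cons hkb] at hl
    obtain ⟨hx, hxs0⟩ := List.cons_eq_cons.mp hl
    have hb : k + ((x :: xs).length : Int) = (k + 1) + (xs.length : Int) := by
      simp only [List.length_cons]; push_cast; ring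
    rw [hb] at hxs0
    subst hx
    have hstep : fact_gen_step (factB (x - 1), acc) x
        = (factB ((x + 1) - 1), acc ++ [factB x]) := by
      simp only [fact_gen_step, factB_step x hk]
      norm_num
    rw [List.foldl_cons, hstep, ih (x + 1) (by omega) hxs0]
    simp


-- ===== VERDICT (by name: the statement is the Claim_ definition above) =====
theorem fact_gen_spec : Claim_equal_fact_gen := by
  intro n _
  unfold Spec_fact_gen fact_gen fact_gen_alt
  by_cases h0 : n = 0
  · simp [h0]
  · rw [if_neg (by simpa using h0), if_neg (by simpa using h0)]
    have hfb : factB ((1 : Int) - 1) = 1 := by rw [factB]; norm_num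
    rcases (by omega : n ≤ 0 ∨ 1 ≤ n) with hn | hn
    · rw [PySem.List.pyRange_one_eq_nil (by omega)]; simp
    · have hlen : (1 : Int) + ((PySem.List.pyRange 1 (n + 1) 1).length : Int) = n + 1 := by
        rw [PySem.List.length_pyRange_one]; omega
      have h := loop_eq (PySem.List.pyRange 1 (n + 1) 1) 1 (le_refl 1) (by rw [hlen]) []
      rw [hfb] at h
      simpa using h
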